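-- pv_equiv track=rewrite | github.com/tosoba/Grind | intro_to_algorithms/chapter_15/rod_cut.py | rod_cut_with_cut_price_no_dp
-- ===== SOURCE A (Python) =====
-- from typing import List
--
-- def rod_cut_with_cut_price_no_dp(prices: List[int], length: int, cut_price: int) -> int:
--     assert prices and 1 <= length <= len(prices)
--     if length == 1:
--         return prices[0]
--     revenues = [prices[length - 1]]
--     for i in range(length - 2, -1, -1):
--         revenues.append(rod_cut_with_cut_price_no_dp(prices, i + 1, cut_price) + prices[length - 2 - i] - cut_price)
--     return max(revenues)
-- ===== SOURCE B (Python) =====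
-- def rod_cut_with_cut_price_no_dp(prices, length, cut_price):
--     # Bottom-up DP over lengths (O(length^2)) instead of A's exponential recursion.
--     dp = [prices[0]]
--     for L in range(2, length + 1):
--         best = prices[L - 1]
--         for j in range(L - 1):
--             best = max(best, dp[j] + prices[L - 2 - j] - cut_price)
--         dp.append(best)
--     return dp[length - 1]
-- ===== Notes on version B (the rewrite author's own statement) =====
-- stated objective: faster
-- what changed: Replaced A's exponential top-down recursion (recomputing each sub-length) with a bottom-up dynamic-programming table over lengths.
import Mathlib
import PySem

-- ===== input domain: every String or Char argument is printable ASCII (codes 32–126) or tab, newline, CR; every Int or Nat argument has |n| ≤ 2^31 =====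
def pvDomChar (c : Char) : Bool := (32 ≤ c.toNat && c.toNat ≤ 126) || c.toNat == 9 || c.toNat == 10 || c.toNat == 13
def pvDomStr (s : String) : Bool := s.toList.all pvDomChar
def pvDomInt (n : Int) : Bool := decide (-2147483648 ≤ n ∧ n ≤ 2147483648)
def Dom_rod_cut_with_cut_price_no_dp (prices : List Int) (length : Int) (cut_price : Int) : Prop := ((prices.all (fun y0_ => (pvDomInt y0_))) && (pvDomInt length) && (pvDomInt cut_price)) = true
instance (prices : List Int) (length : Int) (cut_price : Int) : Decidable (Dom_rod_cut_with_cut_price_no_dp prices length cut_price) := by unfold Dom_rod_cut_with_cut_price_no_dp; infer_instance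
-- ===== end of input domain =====

-- ===== PORT A =====
-- B replaces A's exponential recursion by a bottom-up DP table over lengths (asymptotically faster).
-- Port of A: recursion on the (Nat-valued) length.  A's loop 'for i in range(length-2,-1,-1)'
-- is transcribed with k = (length-2) - i, so k runs 0..length-2 in the same append order:
-- the appended value f(i+1)+prices[length-2-i]-cut_price becomes f(n+1-k)+prices[k]-cut_price (n = length-2).
def pvAcore (prices : List Int) (cut_price : Int) : Nat → Int
  | 0 => 0            -- unreachable under Pre_ (A's assert fails for length < 1)
  | 1 => (PySem.List.pyGet? prices 0).getD 0
  | n + 2 =>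
    let revenues := (List.range (n + 1)).foldl
      (fun acc k => acc ++ [pvAcore prices cut_price (n + 1 - k)
                             + (PySem.List.pyGet? prices (k : Int)).getD 0 - cut_price])
      [(PySem.List.pyGet? prices ((n : Int) + 1)).getD 0]
    (PySem.List.max? revenues (fun y => y)).getD 0
  decreasing_by omega

def rod_cut_with_cut_price_no_dp (prices : List Int) (length : Int) (cut_price : Int) : Int :=
  pvAcore prices cut_price length.toNat

-- ===== PORT B =====
def rod_cut_with_cut_price_no_dp_alt (prices : List Int) (length : Int) (cut_price : Int) : Int :=
  let p : Int → Int := fun i => (PySem.List.pyGet? prices i).getD 0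
  let dp := (List.range (length.toNat - 1)).foldl
    (fun dp t =>
      let best := (List.range (t + 1)).foldl
        (fun best (j : Nat) => max best (dp.getD j 0 + p ((t : Int) - (j : Int)) - cut_price))
        (p ((t : Int) + 1))
      dp ++ [best])
    [p 0]
  dp.getD (length.toNat - 1) 0

-- ===== PRECONDITION & SPEC =====
-- Pre_ excludes exactly the inputs where A's 'assert prices and 1 <= length <= len(prices)' raises.
def Pre_rod_cut_with_cut_price_no_dp (prices : List Int) (length : Int) (cut_price : Int) : Prop :=
  1 ≤ length ∧ length ≤ prices.length
instance (prices : List Int) (length : Int) (cut_price : Int) : Decidable (Pre_rod_cut_with_cut_price_no_dp prices length cut_price) := by unfold Pre_rod_cut_with_cut_price_no_dp; infer_instance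
def pvWitness_rod_cut_with_cut_price_no_dp : List Int × Int × Int := ([1, 5, 8, 9], 4, 2)

def Spec_rod_cut_with_cut_price_no_dp (prices : List Int) (length : Int) (cut_price : Int) (out : Int) : Prop := out = rod_cut_with_cut_price_no_dp_alt prices length cut_price
instance (prices : List Int) (length : Int) (cut_price : Int) (out : Int) : Decidable (Spec_rod_cut_with_cut_price_no_dp prices length cut_price out) := by unfold Spec_rod_cut_with_cut_price_no_dp; infer_instance

-- ===== CLAIM (what is proved, stated in full; the proofs are below) =====
def Claim_equal_rod_cut_with_cut_price_no_dp : Prop := ∀ (prices : List Int) (length : Int) (cut_price : Int), Dom_rod_cut_with_cut_price_no_dp prices length cut_price → Pre_rod_cut_with_cut_price_no_dp prices length cut_price → Spec_rod_cut_with_cut_price_no_dp prices length cut_price (rod_cut_with_cut_price_no_dp prices length cut_price)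

-- ===== LEMMAS AND PROOFS =====

lemma pv_foldl_max_init (g : Nat → Int) (l : List Nat) (a x : Int) :
    l.foldl (fun b k => max b (g k)) (max a x)
      = max (l.foldl (fun b k => max b (g k)) a) x := by
  induction l generalizing a with
  | nil => rfl
  | cons h t ih => simp only [List.foldl_cons, max_right_comm a x (g h), ih]

lemma pv_foldl_max_range_rev (g : Nat → Int) (n : Nat) (a : Int) :
    (List.range n).foldl (fun b k => max b (g k)) a
      = (List.range n).foldl (fun b k => max b (g (n - 1 - k))) a := by
  induction n generalizing a with
  | zero => rfl
  | succ n ih =>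
    conv_lhs => rw [List.range_succ]
    rw [List.foldl_append]
    conv_rhs => rw [List.range_succ_eq_map]
    simp only [List.foldl_cons, List.foldl_nil, List.foldl_map, Nat.add_sub_cancel,
      Nat.sub_zero]
    have h1 : (List.range n).foldl (fun b k => max b (g (n - (k + 1)))) (max a (g n))
        = (List.range n).foldl (fun b k => max b (g (n - 1 - k))) (max a (g n)) := by
      apply PySem.List.foldl_congr_mem
      intro b k hk
      have hnk : n - (k + 1) = n - 1 - k := by omega
      rw [hnk]
    rw [h1, ← ih (max a (g n)), pv_foldl_max_init]

-- characterisation of A's recursion as a running max over the appended terms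
lemma pvAcore_succ_succ (prices : List Int) (c : Int) (n : Nat) :
    pvAcore prices c (n + 2)
      = (List.range (n + 1)).foldl
          (fun b k => max b (pvAcore prices c (n + 1 - k)
                              + (PySem.List.pyGet? prices (k : Int)).getD 0 - c))
          ((PySem.List.pyGet? prices ((n : Int) + 1)).getD 0) := by
  rw [pvAcore]
  simp only [PySem.List.foldl_append_singleton_eq_map, List.singleton_append,
    PySem.List.max?_id_cons, Option.getD_some, List.foldl_map]

-- B's dp table holds exactly A's values f(1), …, f(t+1)
lemma pv_dp_spec (prices : List Int) (c : Int) (t : Nat) :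
    (List.range t).foldl
      (fun dp t =>
        let best := (List.range (t + 1)).foldl
          (fun best (j : Nat) => max best (dp.getD j 0
                          + (PySem.List.pyGet? prices ((t : Int) - (j : Int))).getD 0 - c))
          ((PySem.List.pyGet? prices ((t : Int) + 1)).getD 0)
        dp ++ [best])
      [(PySem.List.pyGet? prices 0).getD 0]
      = (List.range (t + 1)).map (fun k => pvAcore prices c (k + 1)) := by
  induction t with
  | zero => simp [pvAcore]
  | succ t ih =>
    rw [List.range_succ, List.foldl_append, ih]
    simp only [List.foldl_cons, List.foldl_nil]
    rw [List.range_succ (n := t + 1), List.map_append]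
    congr 1
    simp only [List.map_cons, List.map_nil]
    congr 1
    -- best at step t equals pvAcore (t+2)
    rw [pvAcore_succ_succ]
    rw [pv_foldl_max_range_rev (fun k => pvAcore prices c (t + 1 - k)
          + (PySem.List.pyGet? prices (k : Int)).getD 0 - c) (t + 1)]
    simp only [Nat.add_sub_cancel]
    apply PySem.List.foldl_congr_mem
    intro b j hj
    have hj' : j < t + 1 := List.mem_range.mp hj
    have h1 : t + 1 - (t - j) = j + 1 := by omega
    rw [h1]
    have h2 : ((List.range (t + 1)).map (fun k => pvAcore prices c (k + 1))).getD j 0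
        = pvAcore prices c (j + 1) := by
      rw [List.getD_eq_getElem?_getD]
      simp [hj']
    rw [h2]
    have h3 : ((t - j : Nat) : Int) = (t : Int) - (j : Int) := by omega
    rw [h3]

-- ===== VERDICT (by name: the statement is the Claim_ definition above) =====
theorem rod_cut_with_cut_price_no_dp_spec : Claim_equal_rod_cut_with_cut_price_no_dp := by
  intro prices length cut_price _hDom hPre
  obtain ⟨h1, h2⟩ := hPre
  unfold Spec_rod_cut_with_cut_price_no_dp
  unfold rod_cut_with_cut_price_no_dp rod_cut_with_cut_price_no_dp_alt
  simp only
  rw [pv_dp_spec]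
  have hn : 1 ≤ length.toNat := by omega
  obtain ⟨m, hm⟩ : ∃ m, length.toNat = m + 1 := ⟨length.toNat - 1, by omega⟩
  rw [hm]
  simp only [Nat.add_sub_cancel]
  rw [List.getD_eq_getElem?_getD]
  simp
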